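-- pv_equiv track=rewrite | github.com/syjung/postgres-narrow-to-wide-migrator | schema_analyzer.py | _determine_primary_format
-- ===== SOURCE A (Python) =====
-- from typing import Dict, List, Set, Any
--
-- def _determine_primary_format(value_formats: List[str]) -> str:
--     """Determine the primary value format for a data channel"""
--     if not value_formats:
--         return 'String'  # Default to String
--
--     # Priority order: Decimal > Integer > String > Boolean
--     priority_order = ['Decimal', 'Integer', 'String', 'Boolean']
--
--     for format_type in priority_order:
--         if format_type in value_formats:
--             return format_type
--
--     return value_formats[0]  # Fallback to first format
-- ===== SOURCE B (Python) =====
-- def _determine_primary_format(value_formats):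
--     """Determine the primary value format for a data channel"""
--     if not value_formats:
--         return 'String'  # Default to String
--     rank = {'Decimal': 0, 'Integer': 1, 'String': 2, 'Boolean': 3}
--     # Present formats have distinct ranks, so the min is the highest-priority
--     # one present; if none are present every element ranks 4 and min returns
--     # the first element, which is the fallback.
--     return min(value_formats, key=lambda f: rank.get(f, len(rank)))
-- ===== Notes on version B (the rewrite author's own statement) =====
-- stated objective: simpler
-- what changed: Replaced the four-way priority scan with membership tests over the whole list by a rank dictionary and a single min() pass over the input; the fallback branch disappears because unknown formats share a sentinel rank.
import Mathlib
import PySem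

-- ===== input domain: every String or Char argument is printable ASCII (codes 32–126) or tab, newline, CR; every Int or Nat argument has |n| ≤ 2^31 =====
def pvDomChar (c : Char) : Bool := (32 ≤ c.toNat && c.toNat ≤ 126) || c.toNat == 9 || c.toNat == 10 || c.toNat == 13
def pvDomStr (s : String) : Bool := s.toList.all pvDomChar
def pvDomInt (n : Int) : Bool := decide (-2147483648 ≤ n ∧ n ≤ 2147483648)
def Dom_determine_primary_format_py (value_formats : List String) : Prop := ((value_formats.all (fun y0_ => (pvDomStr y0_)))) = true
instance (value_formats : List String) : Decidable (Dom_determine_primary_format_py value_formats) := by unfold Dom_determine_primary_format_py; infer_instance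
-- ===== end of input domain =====

-- B replaces A's priority scan (membership test per priority) by a rank dictionary and a
-- single min-by-rank pass over the input list; objective: simpler.


-- ===== PORT A =====
-- the 'for format_type in priority_order: if format_type in value_formats: return format_type' loop
def pvPriorityLoop (priority_order : List String) (value_formats : List String) : Option String :=
  match priority_order with
  | [] => none
  | f :: rest => if f ∈ value_formats then some f else pvPriorityLoop rest value_formats

def determine_primary_format_py (value_formats : List String) : String :=
  if value_formats = [] then "String"
  else
    match pvPriorityLoop ["Decimal", "Integer", "String", "Boolean"] value_formats with
    | some f => f
    -- value_formats[0]; the list is nonempty here, so the getD default is unreachable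
    | none => (PySem.List.pyGet? value_formats 0).getD ""

-- ===== PORT B =====
def determine_primary_format_py_alt (value_formats : List String) : String :=
  match value_formats with
  | [] => "String"
  | x :: t =>
    let rank : PySem.Dict String Int :=
      PySem.Dict.ofList [("Decimal", 0), ("Integer", 1), ("String", 2), ("Boolean", 3)]
    -- min(value_formats, key=lambda f: rank.get(f, len(rank))): Python's min keeps the
    -- FIRST element of minimal key; exact as the running-minimum fold from the head
    t.foldl (fun m f => if rank.getD f 4 < rank.getD m 4 then f else m) x

-- ===== PRECONDITION & SPEC =====
def Spec_determine_primary_format_py (value_formats : List String) (out : String) : Prop := out = determine_primary_format_py_alt value_formats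
instance (value_formats : List String) (out : String) : Decidable (Spec_determine_primary_format_py value_formats out) := by unfold Spec_determine_primary_format_py; infer_instance

-- ===== CLAIM (what is proved, stated in full; the proofs are below) =====
def Claim_equal_determine_primary_format_py : Prop := ∀ (value_formats : List String), Dom_determine_primary_format_py value_formats → Spec_determine_primary_format_py value_formats (determine_primary_format_py value_formats)

-- ===== LEMMAS AND PROOFS =====

-- the pure rank function the dict lookup computes
def pvRank (s : String) : Int :=
  if s = "Decimal" then 0 else if s = "Integer" then 1 else if s = "String" then 2
  else if s = "Boolean" then 3 else 4

lemma pvRank_eq_getD (s : String) :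
    (PySem.Dict.ofList [("Decimal", (0 : Int)), ("Integer", 1), ("String", 2), ("Boolean", 3)]).getD s 4
      = pvRank s := by
  by_cases h0 : s = "Decimal"
  · subst h0; decide
  by_cases h1 : s = "Integer"
  · subst h1; decide
  by_cases h2 : s = "String"
  · subst h2; decide
  by_cases h3 : s = "Boolean"
  · subst h3; decide
  have b0 : ("Decimal" == s) = false := beq_eq_false_iff_ne.mpr (Ne.symm h0)
  have b1 : ("Integer" == s) = false := beq_eq_false_iff_ne.mpr (Ne.symm h1)
  have b2 : ("String" == s) = false := beq_eq_false_iff_ne.mpr (Ne.symm h2)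
  have b3 : ("Boolean" == s) = false := beq_eq_false_iff_ne.mpr (Ne.symm h3)
  simp [PySem.Dict.getD, PySem.Dict.get?, PySem.Dict.ofList, PySem.Dict.update,
    PySem.Dict.insert, PySem.Dict.empty, PySem.Dict.contains, List.find?,
    b0, b1, b2, b3, pvRank, h0, h1, h2, h3]

-- what A's priority scan returns, with fallback b (the head of the list)
def pvTarget (b : String) (l : List String) : String :=
  if "Decimal" ∈ b :: l then "Decimal"
  else if "Integer" ∈ b :: l then "Integer"
  else if "String" ∈ b :: l then "String"
  else if "Boolean" ∈ b :: l then "Boolean"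
  else b

set_option maxHeartbeats 2000000 in
lemma min_fold_eq_target (l : List String) (b : String) :
    List.foldl (fun m f => if pvRank f < pvRank m then f else m) b l = pvTarget b l := by
  induction l generalizing b with
  | nil =>
    simp only [List.foldl_nil, pvTarget, List.mem_cons, List.not_mem_nil, or_false]
    split_ifs with h1 h2 h3 h4 <;> simp_all
  | cons x t ih =>
    simp only [List.foldl_cons]
    split_ifs with hc <;> rw [ih] <;> clear ih <;>
    by_cases hx0 : x = "Decimal" <;> by_cases hx1 : x = "Integer" <;>
      by_cases hx2 : x = "String" <;> by_cases hx3 : x = "Boolean" <;>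
      by_cases hb0 : b = "Decimal" <;> by_cases hb1 : b = "Integer" <;>
      by_cases hb2 : b = "String" <;> by_cases hb3 : b = "Boolean" <;>
      subst_vars <;>
      simp_all [pvTarget, pvRank, @eq_comm String]

lemma priorityLoop_eq (x : String) (t : List String) :
    determine_primary_format_py (x :: t) = pvTarget x t := by
  simp only [determine_primary_format_py, pvPriorityLoop, pvTarget, List.mem_cons]
  split_ifs <;> simp_all

-- ===== VERDICT (by name: the statement is the Claim_ definition above) =====
theorem determine_primary_format_py_spec : Claim_equal_determine_primary_format_py := by
  intro l _
  unfold Spec_determine_primary_format_py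
  cases l with
  | nil => rfl
  | cons x t =>
    rw [priorityLoop_eq]
    simp only [determine_primary_format_py_alt, pvRank_eq_getD]
    rw [min_fold_eq_target]
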